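-- pv_equiv track=rewrite | github.com/hmghaly/word_align | dep_lib.py | gen_ptb
-- ===== SOURCE A (Python) =====
-- def gen_ptb(input_child_dict,node,ptb_str,depth=0):	 #nodes are in the form of ("S",5)
-- 	#op_br,cl_br="[","]"
-- 	op_br,cl_br="(",")"
-- 	cur_children=input_child_dict.get(node,[])
-- 	if not cur_children:
-- 		ptb_str+=node[0]
-- 		return ptb_str
-- 	ptb_str+=op_br+node[0]+" "
-- 	for cc in cur_children:
-- 		ptb_str=gen_ptb(input_child_dict,cc,ptb_str,depth+1)
-- 	ptb_str+=cl_br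
-- 	return ptb_str
-- ===== SOURCE B (Python) =====
-- def gen_ptb(input_child_dict, node, ptb_str, depth=0):
--     # B: iterative with an explicit stack of work items (a node to expand, or a
--     # literal string to emit); children are pushed in reverse so they pop
--     # left-to-right. No recursion, no threaded accumulator growth per call.
--     pieces = [ptb_str]
--     stack = [node]
--     while stack:
--         item = stack.pop()
--         if isinstance(item, str):
--             pieces.append(item)
--             continue
--         cs = input_child_dict.get(item, [])
--         if not cs:
--             pieces.append(item[0])
--         else:
--             pieces.append("(" + item[0] + " ")
--             stack.append(")")
--             stack.extend(reversed(cs))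
--     return "".join(pieces)
-- ===== Notes on version B (the rewrite author's own statement) =====
-- stated objective: alternative
-- what changed: B replaces A's recursion (accumulator string threaded through recursive calls and a for-loop) with an iterative explicit work-item stack: items are nodes to expand or literal strings to emit, children pushed in reverse so they pop left-to-right, pieces joined once at the end.
import Mathlib
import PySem

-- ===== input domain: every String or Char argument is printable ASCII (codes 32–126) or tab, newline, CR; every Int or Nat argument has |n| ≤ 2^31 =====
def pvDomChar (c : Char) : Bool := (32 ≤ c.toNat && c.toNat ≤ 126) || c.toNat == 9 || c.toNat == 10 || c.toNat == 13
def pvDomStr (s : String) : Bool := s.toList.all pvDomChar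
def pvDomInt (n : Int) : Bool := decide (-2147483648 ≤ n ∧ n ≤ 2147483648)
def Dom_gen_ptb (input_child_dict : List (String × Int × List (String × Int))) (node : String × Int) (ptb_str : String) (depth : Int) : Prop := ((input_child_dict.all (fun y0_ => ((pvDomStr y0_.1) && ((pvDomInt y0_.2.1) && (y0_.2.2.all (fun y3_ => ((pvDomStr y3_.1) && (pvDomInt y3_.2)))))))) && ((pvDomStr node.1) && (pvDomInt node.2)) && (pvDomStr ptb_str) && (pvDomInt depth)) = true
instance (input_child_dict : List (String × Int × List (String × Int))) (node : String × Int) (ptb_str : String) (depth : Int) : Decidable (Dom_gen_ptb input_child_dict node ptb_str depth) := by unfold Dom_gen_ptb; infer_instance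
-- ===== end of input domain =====

-- B replaces A's recursion with an explicit work-item stack, iterated (different decomposition, same cost).
-- Both the Python A (recursion) and Python B (while loop) fail to terminate on a
-- cyclic child dict; both ports carry a fuel guard for totality — A a recursion
-- depth of input_child_dict.length + 1 (enough for any acyclic dict), B an outer
-- iteration count derived from the same depth bound — and the guards agree.

-- dict.get(node, []) on the child dict: first entry whose key pair equals node
def pvChildrenOf (input_child_dict : List (String × Int × List (String × Int))) (node : String × Int) : List (String × Int) :=
  match input_child_dict.find? (fun e => e.1 == node.1 && e.2.1 == node.2) with
  | some e => e.2.2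
  | none => []

-- ===== PORT A =====
def gen_ptb_fuel (input_child_dict : List (String × Int × List (String × Int))) : Nat → (String × Int) → String → Int → String
  | 0, _, ptb_str, _ => ptb_str    -- fuel exhaustion guard only (Python would recurse further)
  | fuel+1, node, ptb_str, depth =>
    let cur_children := pvChildrenOf input_child_dict node
    if cur_children = [] then
      ptb_str ++ node.1
    else
      let s := ptb_str ++ "(" ++ node.1 ++ " "
      let s := cur_children.foldl (fun acc cc => gen_ptb_fuel input_child_dict fuel cc acc (depth+1)) s
      s ++ ")"

def gen_ptb (input_child_dict : List (String × Int × List (String × Int))) (node : String × Int) (ptb_str : String) (depth : Int) : String :=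
  gen_ptb_fuel input_child_dict (input_child_dict.length + 1) node ptb_str depth

-- ===== PORT B =====
-- a work item is either a node still to expand (paired with its depth-fuel
-- allowance, the port's totality device) or a literal string to emit
-- iteration count needed by the loop for one node at a given depth allowance
def pvCnt (input_child_dict : List (String × Int × List (String × Int))) : Nat → (String × Int) → Nat
  | 0, _ => 1
  | df+1, n =>
    let cs := pvChildrenOf input_child_dict n
    if cs = [] then 1 else 2 + (cs.map (pvCnt input_child_dict df)).sum

def pvLoop (input_child_dict : List (String × Int × List (String × Int))) :
    Nat → List ((Nat × String × Int) ⊕ String) → String → String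
  | 0, _, out => out          -- fuel exhaustion guard only (never reached: fuel = pvCnt)
  | _+1, [], out => out
  | f+1, Sum.inr s :: rest, out => pvLoop input_child_dict f rest (out ++ s)
  | f+1, Sum.inl (0, _) :: rest, out => pvLoop input_child_dict f rest out   -- depth-fuel guard
  | f+1, Sum.inl (df+1, n) :: rest, out =>
    let cs := pvChildrenOf input_child_dict n
    if cs = [] then
      pvLoop input_child_dict f rest (out ++ n.1)
    else
      pvLoop input_child_dict f
        (cs.map (fun c => Sum.inl (df, c)) ++ [Sum.inr ")"] ++ rest)
        (out ++ "(" ++ n.1 ++ " ")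

def gen_ptb_alt (input_child_dict : List (String × Int × List (String × Int))) (node : String × Int) (ptb_str : String) (depth : Int) : String :=
  pvLoop input_child_dict
    (pvCnt input_child_dict (input_child_dict.length + 1) node)
    [Sum.inl (input_child_dict.length + 1, node)] ptb_str

-- ===== PRECONDITION & SPEC =====
def Spec_gen_ptb (input_child_dict : List (String × Int × List (String × Int))) (node : String × Int) (ptb_str : String) (depth : Int) (out : String) : Prop := out = gen_ptb_alt input_child_dict node ptb_str depth
instance (input_child_dict : List (String × Int × List (String × Int))) (node : String × Int) (ptb_str : String) (depth : Int) (out : String) : Decidable (Spec_gen_ptb input_child_dict node ptb_str depth out) := by unfold Spec_gen_ptb; infer_instance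

-- ===== CLAIM (what is proved, stated in full; the proofs are below) =====
def Claim_equal_gen_ptb : Prop := ∀ (input_child_dict : List (String × Int × List (String × Int))) (node : String × Int) (ptb_str : String) (depth : Int), Dom_gen_ptb input_child_dict node ptb_str depth → Spec_gen_ptb input_child_dict node ptb_str depth (gen_ptb input_child_dict node ptb_str depth)

-- ===== LEMMAS AND PROOFS =====

-- A's result does not depend on the depth argument
theorem gen_ptb_fuel_depth_irrel (d : List (String × Int × List (String × Int))) :
    ∀ (f : Nat) (n : String × Int) (out : String) (d1 d2 : Int),
      gen_ptb_fuel d f n out d1 = gen_ptb_fuel d f n out d2 := by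
  intro f
  induction f with
  | zero => intro n out d1 d2; rfl
  | succ f ih =>
    intro n out d1 d2
    simp only [gen_ptb_fuel]
    have : (fun (acc : String) (cc : String × Int) => gen_ptb_fuel d f cc acc (d1+1))
         = (fun (acc : String) (cc : String × Int) => gen_ptb_fuel d f cc acc (d2+1)) :=
      funext fun acc => funext fun cc => ih cc acc (d1+1) (d2+1)
    rw [this]

-- key invariant: running the loop on a node item with exactly its iteration
-- count of fuel consumes that item and emits A's subtree output
theorem pvLoop_node (d : List (String × Int × List (String × Int))) :
    ∀ (df : Nat) (n : String × Int) (rest : List ((Nat × String × Int) ⊕ String))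
      (out : String) (fuel : Nat),
      pvLoop d (pvCnt d df n + fuel) (Sum.inl (df, n) :: rest) out
        = pvLoop d fuel rest (gen_ptb_fuel d df n out 0) := by
  intro df
  induction df with
  | zero =>
    intro n rest out fuel
    have h1 : pvCnt d 0 n + fuel = fuel + 1 := by simp [pvCnt]; omega
    rw [h1]
    rfl
  | succ df ih =>
    intro n rest out fuel
    by_cases h : pvChildrenOf d n = []
    · have h1 : pvCnt d (df+1) n + fuel = fuel + 1 := by simp [pvCnt, h]; omega
      rw [h1]
      simp only [pvLoop, h, gen_ptb_fuel]
      simp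
    · -- children lemma: processing the mapped children items folds A over them
      have aux : ∀ (cs : List (String × Int)) (rest : List ((Nat × String × Int) ⊕ String))
          (out : String) (fuel : Nat),
          pvLoop d ((cs.map (pvCnt d df)).sum + fuel)
            (cs.map (fun c => Sum.inl (df, c)) ++ rest) out
          = pvLoop d fuel rest
              (cs.foldl (fun acc c => gen_ptb_fuel d df c acc 0) out) := by
        intro cs
        induction cs with
        | nil => intro rest out fuel; simp
        | cons c cs ihc =>
          intro rest out fuel
          simp only [List.map_cons, List.sum_cons, List.foldl_cons, List.cons_append]
          rw [Nat.add_assoc, ih c _ out _, ihc]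
      have h1 : pvCnt d (df+1) n + fuel
          = (((pvChildrenOf d n).map (pvCnt d df)).sum + (1 + fuel)) + 1 := by
        simp [pvCnt, h]; omega
      rw [h1]
      show pvLoop d _ (Sum.inl (df+1, n) :: rest) out = _
      simp only [pvLoop, h, if_false, List.append_assoc]
      rw [aux (pvChildrenOf d n) ([Sum.inr ")"] ++ rest) (out ++ "(" ++ n.1 ++ " ") (1 + fuel)]
      have h2 : (1 + fuel) = fuel + 1 := by omega
      rw [h2]
      show pvLoop d fuel rest (_ ++ ")") = _
      simp only [gen_ptb_fuel, h, if_false]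
      have : (fun (acc : String) (cc : String × Int) => gen_ptb_fuel d df cc acc (0+1))
           = (fun (acc : String) (cc : String × Int) => gen_ptb_fuel d df cc acc 0) :=
        funext fun acc => funext fun cc => gen_ptb_fuel_depth_irrel d df cc acc (0+1) 0
      rw [this]

-- ===== VERDICT (by name: the statement is the Claim_ definition above) =====
theorem gen_ptb_spec : Claim_equal_gen_ptb := by
  intro d node ptb depth _
  unfold Spec_gen_ptb gen_ptb gen_ptb_alt
  have h := pvLoop_node d (d.length + 1) node [] ptb 0
  simp only [Nat.add_zero] at h
  rw [h]
  exact gen_ptb_fuel_depth_irrel d (d.length + 1) node ptb depth 0
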